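-- pv_equiv track=rewrite | github.com/ValeriiGithub/CodeWars | 5 kyu/is_my_friend_cheating.py | remov_nb
-- ===== SOURCE A (Python) =====
-- def remov_nb(n):
--     total_sum = n * (n + 1) // 2  # Sum of numbers from 1 to n
--     result = []
--
--     for a in range(1, n + 1):
--         b = (total_sum - a) // (a + 1)  # Calculate b based on the given condition
--         if 1 <= b <= n and a * b == total_sum - a - b:
--             result.append((a, b))
--
--     return result
-- ===== SOURCE B (Python) =====
-- def remov_nb(n):
--     # (a+1)*(b+1) = n*(n+1)//2 + 1 =: M, so enumerate divisor pairs of M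
--     # by trial division up to sqrt(M) instead of scanning every a in 1..n.
--     if n < 2:
--         return []  # no factor f with 2 <= f <= n+1 can exist
--     M = n * (n + 1) // 2 + 1
--     cands = set()
--     i = 1
--     while i * i <= M:
--         if M % i == 0:
--             for f in (i, M // i):
--                 g = M // f
--                 if 2 <= f <= n + 1 and 2 <= g <= n + 1:
--                     cands.add(f - 1)
--         i += 1
--     return [(a, M // (a + 1) - 1) for a in sorted(cands)]
-- ===== Notes on version B (the rewrite author's own statement) =====
-- stated objective: faster
-- what changed: B rewrites the condition as (a+1)*(b+1) = n*(n+1)//2 + 1 =: M and enumerates divisor pairs of M by trial division up to sqrt(M) into a set, then sorts the valid a's, instead of A's linear scan testing every a in 1..n.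
import Mathlib
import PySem

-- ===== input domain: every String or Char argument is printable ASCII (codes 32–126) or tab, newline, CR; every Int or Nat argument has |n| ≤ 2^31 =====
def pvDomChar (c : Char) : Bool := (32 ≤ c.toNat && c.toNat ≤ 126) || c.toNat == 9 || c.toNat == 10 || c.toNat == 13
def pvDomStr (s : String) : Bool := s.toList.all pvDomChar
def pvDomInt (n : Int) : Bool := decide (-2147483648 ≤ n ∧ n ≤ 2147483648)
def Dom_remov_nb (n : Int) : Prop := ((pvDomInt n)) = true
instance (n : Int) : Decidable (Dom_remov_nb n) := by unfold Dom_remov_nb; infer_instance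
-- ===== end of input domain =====

-- B re-implements remov_nb by enumerating divisor pairs of M = n*(n+1)//2 + 1 by trial
-- division up to sqrt(M) (since (a+1)*(b+1) = M), then sorting the valid a's — an
-- alternative algorithm replacing A's linear scan over all a in 1..n.

-- ===== PORT A =====
def remov_nb (n : Int) : List (Int × Int) :=
  let total_sum := PySem.Int.floordiv (n * (n + 1)) 2
  (PySem.List.pyRange 1 (n + 1) 1).foldl (fun result a =>
    let b := PySem.Int.floordiv (total_sum - a) (a + 1)
    if 1 ≤ b ∧ b ≤ n ∧ a * b = total_sum - a - b then result ++ [(a, b)] else result) []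

-- ===== PORT B =====
-- the `while i*i <= M` loop of Source B (i only ever counts up from 1, so it is a Nat here)
def pvBLoop (n M : Int) (i : Nat) (acc : PySem.Set Int) : PySem.Set Int :=
  if h : (i : Int) * (i : Int) ≤ M then
    let acc' :=
      if PySem.Int.mod M (i : Int) = 0 then
        ([(i : Int), PySem.Int.floordiv M (i : Int)] : List Int).foldl (fun s f =>
          let g := PySem.Int.floordiv M f
          if 2 ≤ f ∧ f ≤ n + 1 ∧ 2 ≤ g ∧ g ≤ n + 1 then PySem.Set.add s (f - 1) else s) acc
      else acc
    pvBLoop n M (i + 1) acc'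
  else acc
termination_by (M + 1 - (i : Int) * (i : Int)).toNat
decreasing_by
  have key : (((i + 1 : Nat)) : Int) * (((i + 1 : Nat)) : Int)
      = (i : Int) * (i : Int) + 2 * (i : Int) + 1 := by push_cast; ring
  rw [key]
  have hi : (0 : Int) ≤ (i : Int) := Int.natCast_nonneg i
  generalize _hx : (i : Int) * (i : Int) = x at *
  omega

def remov_nb_alt (n : Int) : List (Int × Int) :=
  if n < 2 then [] else
  let M := PySem.Int.floordiv (n * (n + 1)) 2 + 1
  let cands := pvBLoop n M 1 PySem.Set.empty
  (PySem.List.sorted cands (fun x => x) false).map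
    (fun a => (a, PySem.Int.floordiv M (a + 1) - 1))

-- ===== PRECONDITION & SPEC =====
def Spec_remov_nb (n : Int) (out : List (Int × Int)) : Prop := out = remov_nb_alt n
instance (n : Int) (out : List (Int × Int)) : Decidable (Spec_remov_nb n out) := by unfold Spec_remov_nb; infer_instance

-- ===== CLAIM (what is proved, stated in full; the proofs are below) =====
def Claim_equal_remov_nb : Prop := ∀ (n : Int), Dom_remov_nb n → Spec_remov_nb n (remov_nb n)

-- ===== LEMMAS AND PROOFS =====

-- M = triangular sum + 1
def pvM (n : Int) : Int := PySem.Int.floordiv (n * (n + 1)) 2 + 1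

lemma pvM_pos (n : Int) : 1 ≤ pvM n := by
  have h0 : 0 ≤ n * (n + 1) := by
    by_cases h : 0 ≤ n
    · exact mul_nonneg h (by omega)
    · nlinarith
  have := PySem.Int.floordiv_eq_ediv_of_pos (a := n * (n + 1)) (b := 2) (by norm_num)
  unfold pvM
  rw [this]
  have := Int.ediv_nonneg h0 (by norm_num : (0:Int) ≤ 2)
  omega

-- F f : factor f of M is usable (both cofactors in [2, n+1])
abbrev pvF (n f : Int) : Prop :=
  2 ≤ f ∧ f ≤ n + 1 ∧ 2 ≤ PySem.Int.floordiv (pvM n) f ∧ PySem.Int.floordiv (pvM n) f ≤ n + 1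


-- valid a's, as a predicate
abbrev pvP (n a : Int) : Prop := (a + 1) ∣ pvM n ∧ pvF n (a + 1)


lemma pv_foldl_append_dite {α β : Type} (p : α → Prop) [DecidablePred p] (f : α → β)
    (l : List α) (acc : List β) :
    l.foldl (fun acc x => if p x then acc ++ [f x] else acc) acc
      = acc ++ (l.filter (fun x => decide (p x))).map f := by
  induction l generalizing acc with
  | nil => simp
  | cons x xs ih =>
    by_cases h : p x <;> simp [List.foldl_cons, h, ih]

-- b = (total - a) // (a+1) = M//(a+1) - 1, for a ≥ 1
lemma pv_b_eq (n a : Int) (ha : 1 ≤ a) :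
    PySem.Int.floordiv (PySem.Int.floordiv (n * (n + 1)) 2 - a) (a + 1)
      = PySem.Int.floordiv (pvM n) (a + 1) - 1 := by
  have hpos : (0:Int) < a + 1 := by omega
  rw [PySem.Int.floordiv_eq_ediv_of_pos hpos, PySem.Int.floordiv_eq_ediv_of_pos (a := pvM n) hpos]
  unfold pvM
  have : PySem.Int.floordiv (n * (n + 1)) 2 - a = (pvM n - (a + 1)) := by unfold pvM; ring
  rw [this]
  unfold pvM
  have := Int.add_mul_ediv_right (PySem.Int.floordiv (n * (n + 1)) 2 + 1) (-1) (show a + 1 ≠ 0 by omega)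
  -- (M + (-1)*(a+1)) / (a+1) = M/(a+1) + (-1)
  have h2 : PySem.Int.floordiv (n * (n + 1)) 2 + 1 - (a + 1)
      = PySem.Int.floordiv (n * (n + 1)) 2 + 1 + (-1) * (a + 1) := by ring
  rw [h2, this]
  ring

-- A's loop condition characterised
lemma pv_condA_iff (n a : Int) (ha : 1 ≤ a) (han : a ≤ n) :
    (1 ≤ PySem.Int.floordiv (pvM n) (a + 1) - 1
      ∧ PySem.Int.floordiv (pvM n) (a + 1) - 1 ≤ n
      ∧ a * (PySem.Int.floordiv (pvM n) (a + 1) - 1)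
          = PySem.Int.floordiv (n * (n + 1)) 2 - a - (PySem.Int.floordiv (pvM n) (a + 1) - 1))
    ↔ pvP n a := by
  have hpos : (0:Int) < a + 1 := by omega
  unfold pvP pvF
  have htot : PySem.Int.floordiv (n * (n + 1)) 2 = pvM n - 1 := by unfold pvM; ring
  have hqd : (a + 1) ∣ pvM n → (a + 1) * PySem.Int.floordiv (pvM n) (a + 1) = pvM n := fun hd => by
    rw [PySem.Int.floordiv_eq_ediv_of_pos hpos]; exact Int.mul_ediv_cancel' hd
  rw [htot]
  generalize hq : PySem.Int.floordiv (pvM n) (a + 1) = q at hqd ⊢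
  constructor
  · rintro ⟨h1, h2, h3⟩
    have hmul : (a + 1) * q = pvM n := by linear_combination h3
    exact ⟨⟨q, hmul.symm⟩, by omega, by omega, by omega, by omega⟩
  · rintro ⟨hdvd, hb1, hb2, hb3, hb4⟩
    have hmul := hqd hdvd
    exact ⟨by omega, by omega, by linear_combination hmul⟩

-- A as filter-map
lemma pv_A_eq (n : Int) :
    remov_nb n = ((PySem.List.pyRange 1 (n + 1) 1).filter (fun a => decide (pvP n a))).map
      (fun a => (a, PySem.Int.floordiv (pvM n) (a + 1) - 1)) := by
  unfold remov_nb
  rw [pv_foldl_append_dite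
    (p := fun a => 1 ≤ PySem.Int.floordiv (PySem.Int.floordiv (n * (n + 1)) 2 - a) (a + 1)
      ∧ PySem.Int.floordiv (PySem.Int.floordiv (n * (n + 1)) 2 - a) (a + 1) ≤ n
      ∧ a * PySem.Int.floordiv (PySem.Int.floordiv (n * (n + 1)) 2 - a) (a + 1)
          = PySem.Int.floordiv (n * (n + 1)) 2 - a
            - PySem.Int.floordiv (PySem.Int.floordiv (n * (n + 1)) 2 - a) (a + 1))
    (f := fun a => (a, PySem.Int.floordiv (PySem.Int.floordiv (n * (n + 1)) 2 - a) (a + 1)))]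
  rw [List.nil_append]
  have hfe : ∀ a ∈ PySem.List.pyRange 1 (n + 1) 1,
      (fun a => decide (1 ≤ PySem.Int.floordiv (PySem.Int.floordiv (n * (n + 1)) 2 - a) (a + 1)
        ∧ PySem.Int.floordiv (PySem.Int.floordiv (n * (n + 1)) 2 - a) (a + 1) ≤ n
        ∧ a * PySem.Int.floordiv (PySem.Int.floordiv (n * (n + 1)) 2 - a) (a + 1)
            = PySem.Int.floordiv (n * (n + 1)) 2 - a
              - PySem.Int.floordiv (PySem.Int.floordiv (n * (n + 1)) 2 - a) (a + 1))) a
      = (fun a => decide (pvP n a)) a := by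
    intro a hmem
    have ha := (PySem.List.mem_pyRange_one).1 hmem
    simp only [decide_eq_decide]
    rw [pv_b_eq n a ha.1]
    exact pv_condA_iff n a ha.1 (by omega)
  rw [List.filter_congr hfe]
  apply List.map_congr_left
  intro a hmem
  have ha : 1 ≤ a := ((PySem.List.mem_pyRange_one).1 ((List.mem_filter.1 hmem).1)).1
  rw [pv_b_eq n a ha]

-- what one pass of the inner for-loop adds
def pvAdd (n M : Int) (j : Nat) (x : Int) : Prop :=
  (j : Int) ∣ M ∧
    ((x = (j : Int) - 1 ∧ 2 ≤ (j : Int) ∧ (j : Int) ≤ n + 1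
        ∧ 2 ≤ PySem.Int.floordiv M (j : Int) ∧ PySem.Int.floordiv M (j : Int) ≤ n + 1)
     ∨ (x = PySem.Int.floordiv M (j : Int) - 1
        ∧ 2 ≤ PySem.Int.floordiv M (j : Int) ∧ PySem.Int.floordiv M (j : Int) ≤ n + 1
        ∧ 2 ≤ PySem.Int.floordiv M (PySem.Int.floordiv M (j : Int))
        ∧ PySem.Int.floordiv M (PySem.Int.floordiv M (j : Int)) ≤ n + 1))

lemma pv_mem_bloop (n M : Int) (i : Nat) (acc : PySem.Set Int) (x : Int) :
    x ∈ pvBLoop n M i acc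
      ↔ x ∈ acc ∨ ∃ j : Nat, i ≤ j ∧ (j : Int) * (j : Int) ≤ M ∧ pvAdd n M j x := by
  fun_induction pvBLoop n M i acc with
  | case1 i acc h acc' ih =>
    have hacc' : x ∈ acc' ↔ x ∈ acc ∨ pvAdd n M i x := by
      simp only [acc']
      split_ifs with hmod
      · simp only [List.foldl_cons, List.foldl_nil]
        have hdvd := (PySem.Int.mod_eq_zero_iff_dvd M (i : Int)).1 hmod
        unfold pvAdd
        split_ifs <;> (try simp only [PySem.Set.mem_add]) <;> tauto
      · have hndvd : ¬ ((i : Int) ∣ M) := fun hd =>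
          hmod ((PySem.Int.mod_eq_zero_iff_dvd M (i : Int)).2 hd)
        unfold pvAdd
        tauto
    rw [ih, hacc']
    constructor
    · rintro ((hx | hadd) | ⟨j, hj, hjj, hadd⟩)
      · exact Or.inl hx
      · exact Or.inr ⟨i, le_refl _, h, hadd⟩
      · exact Or.inr ⟨j, by omega, hjj, hadd⟩
    · rintro (hx | ⟨j, hj, hjj, hadd⟩)
      · exact Or.inl (Or.inl hx)
      · rcases Nat.eq_or_lt_of_le hj with rfl | hlt
        · exact Or.inl (Or.inr hadd)
        · exact Or.inr ⟨j, by omega, hjj, hadd⟩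
  | case2 i acc h =>
    constructor
    · exact Or.inl
    · rintro (hx | ⟨j, hj, hjj, _⟩)
      · exact hx
      · exfalso
        have : (i : Int) * (i : Int) ≤ (j : Int) * (j : Int) := by
          have hij : (i : Int) ≤ (j : Int) := by exact_mod_cast hj
          nlinarith [Int.natCast_nonneg i, Int.natCast_nonneg j]
        omega

lemma pv_bloop_nodup (n M : Int) (i : Nat) (acc : PySem.Set Int) (h : acc.Nodup) :
    (pvBLoop n M i acc).Nodup := by
  fun_induction pvBLoop n M i acc with
  | case1 i acc hle acc' ih =>
    apply ih
    simp only [acc']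
    split_ifs with hmod
    · simp only [List.foldl_cons, List.foldl_nil]
      split_ifs <;> first | exact PySem.Set.nodup_add _ _ (PySem.Set.nodup_add _ _ h) | exact PySem.Set.nodup_add _ _ h | exact h
    · exact h
  | case2 i acc h2 => exact h

-- the collected candidates are exactly the valid a's
lemma pv_mem_cands (n : Int) (x : Int) :
    x ∈ pvBLoop n (pvM n) 1 PySem.Set.empty ↔ (1 ≤ x ∧ x ≤ n ∧ pvP n x) := by
  have hM := pvM_pos n
  rw [pv_mem_bloop]
  simp only [PySem.Set.empty]
  constructor
  · rintro (hx | ⟨j, hj1, hjj, hdvd, hcase⟩)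
    · simp at hx
    · have hjpos : (0:Int) < (j : Int) := by exact_mod_cast hj1
      rcases hcase with ⟨hx, h2, h3, h4, h5⟩ | ⟨hx, h2, h3, h4, h5⟩
      · refine ⟨by omega, by omega, ?_⟩
        unfold pvP pvF
        rw [hx]
        have e1 : (j : Int) - 1 + 1 = (j : Int) := by ring
        rw [e1]
        exact ⟨hdvd, by omega, by omega, h4, h5⟩
      · -- x = M//j - 1 ; f := M//j
        set f := PySem.Int.floordiv (pvM n) (j : Int) with hf
        have hfe : f = pvM n / (j : Int) := by rw [hf, PySem.Int.floordiv_eq_ediv_of_pos hjpos]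
        have hfdvd : f ∣ pvM n := by rw [hfe]; exact Int.ediv_dvd_of_dvd hdvd
        have hmul : (j : Int) * f = pvM n := by rw [hfe]; exact Int.mul_ediv_cancel' hdvd
        have hfj : PySem.Int.floordiv (pvM n) f = (j : Int) := by
          rw [PySem.Int.floordiv_eq_ediv_of_pos (by omega : (0:Int) < f), ← hmul]
          exact Int.mul_ediv_cancel _ (by omega)
        refine ⟨by omega, by omega, ?_⟩
        rw [hx]
        have hx1 : f - 1 + 1 = f := by ring
        unfold pvP pvF
        rw [hx1, hfj]
        exact ⟨hfdvd, h2, h3, by omega, by omega⟩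
  · rintro ⟨hx1, hxn, hdvd, hf1, hf2, hf3, hf4⟩
    right
    set f := x + 1 with hfdef
    have hfpos : (0:Int) < f := by omega
    set g := PySem.Int.floordiv (pvM n) f with hg
    have hge : g = pvM n / f := by rw [hg, PySem.Int.floordiv_eq_ediv_of_pos hfpos]
    have hmul : f * g = pvM n := by rw [hge]; exact Int.mul_ediv_cancel' hdvd
    by_cases hsmall : f * f ≤ pvM n
    · refine ⟨f.toNat, ?_, ?_, ?_, ?_⟩
      · omega
      · rw [Int.toNat_of_nonneg (by omega)]; exact hsmall
      · rw [Int.toNat_of_nonneg (by omega)]; exact hdvd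
      · left
        rw [Int.toNat_of_nonneg (by omega)]
        exact ⟨by omega, hf1, hf2, hf3, hf4⟩
    · -- use the cofactor g
      have hgf : g < f := by nlinarith
      have hgg : g * g ≤ pvM n := by nlinarith
      have hgdvd : g ∣ pvM n := ⟨f, by linear_combination -hmul⟩
      have hfg : PySem.Int.floordiv (pvM n) g = f := by
        rw [PySem.Int.floordiv_eq_ediv_of_pos (by omega : (0:Int) < g), ← hmul]
        exact Int.mul_ediv_cancel _ (by omega)
      refine ⟨g.toNat, ?_, ?_, ?_, ?_⟩
      · omega
      · rw [Int.toNat_of_nonneg (by omega)]; exact hgg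
      · rw [Int.toNat_of_nonneg (by omega)]; exact hgdvd
      · right
        rw [Int.toNat_of_nonneg (by omega)]
        rw [hfg]
        exact ⟨by omega, hf1, hf2, hf3, hf4⟩

-- ===== VERDICT (by name: the statement is the Claim_ definition above) =====
theorem remov_nb_spec : Claim_equal_remov_nb := by
  intro n _
  unfold Spec_remov_nb
  unfold remov_nb_alt
  by_cases hn : n < 2
  · rw [if_pos hn]
    by_cases h0 : n ≤ 0
    · unfold remov_nb
      rw [PySem.List.pyRange_one_eq_nil (by omega)]
      rfl
    · have hn1 : n = 1 := by omega
      subst hn1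
      decide
  rw [if_neg hn]
  rw [pv_A_eq]
  have hMeq : PySem.Int.floordiv (n * (n + 1)) 2 + 1 = pvM n := rfl
  simp only [hMeq]
  set L := (PySem.List.pyRange 1 (n + 1) 1).filter (fun a => decide (pvP n a)) with hL
  set cands := pvBLoop n (pvM n) 1 PySem.Set.empty with hc
  have hnodupL : L.Nodup := (PySem.List.nodup_pyRange_one 1 (n + 1)).filter _
  have hnodupC : cands.Nodup := pv_bloop_nodup n (pvM n) 1 _ (by simp [PySem.Set.empty])
  have hmem : ∀ a, a ∈ L ↔ a ∈ cands := by
    intro a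
    rw [hc, pv_mem_cands, hL, List.mem_filter, PySem.List.mem_pyRange_one]
    simp only [decide_eq_true_eq]
    constructor
    · rintro ⟨⟨h1, h2⟩, h3⟩; exact ⟨h1, by omega, h3⟩
    · rintro ⟨h1, h2, h3⟩; exact ⟨⟨h1, by omega⟩, h3⟩
  have hperm : L.Perm cands := (List.perm_ext_iff_of_nodup hnodupL hnodupC).2 hmem
  have hsortedL : L.Pairwise (fun a b => (fun x => x) a < (fun x => x) b) := by
    exact (PySem.List.pairwise_lt_pyRange_one 1 (n + 1)).filter _
  have hs := PySem.List.sorted_eq_of_perm_of_pairwise_lt cands L (fun x => x) hperm hsortedL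
  rw [hs]
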